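-- pv_equiv track=rewrite | github.com/TalonT-Org/AutoSkillit | src/autoskillit/execution/pr_analysis.py | partition_files_by_domain
-- ===== SOURCE A (Python) =====
-- DOMAIN_PATHS: dict[str, list[str]] = {
--     "Server/MCP Tools": ["src/autoskillit/server/"],
--     "Pipeline/Execution": ["src/autoskillit/execution/", "src/autoskillit/pipeline/"],
--     "Recipe/Validation": ["src/autoskillit/recipe/"],
--     "CLI/Workspace": ["src/autoskillit/cli/", "src/autoskillit/workspace/"],
--     "Skills": ["src/autoskillit/skills/", "src/autoskillit/skills_extended/"],
--     "Tests": ["tests/"],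
--     "Core/Config/Infra": [
--         "src/autoskillit/core/",
--         "src/autoskillit/config/",
--         "src/autoskillit/migration/",
--         "src/autoskillit/hooks/",
--         "src/autoskillit/recipes/",
--     ],
-- }
--
-- def partition_files_by_domain(
--     file_paths: list[str],
--     domain_paths: dict[str, list[str]] | None = None,
-- ) -> dict[str, list[str]]:
--     """Bucket each file path into the first matching domain prefix.
--
--     Unmatched paths go to "Other".
--     """
--     mapping = domain_paths if domain_paths is not None else DOMAIN_PATHS
--     buckets: dict[str, list[str]] = {}
--
--     for path in file_paths:
--         assigned = False
--         for domain, prefixes in mapping.items():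
--             if any(path.startswith(prefix) for prefix in prefixes):
--                 buckets.setdefault(domain, []).append(path)
--                 assigned = True
--                 break
--         if not assigned:
--             buckets.setdefault("Other", []).append(path)
--
--     return buckets
-- ===== SOURCE B (Python) =====
-- DOMAIN_PATHS: dict[str, list[str]] = {
--     "Server/MCP Tools": ["src/autoskillit/server/"],
--     "Pipeline/Execution": ["src/autoskillit/execution/", "src/autoskillit/pipeline/"],
--     "Recipe/Validation": ["src/autoskillit/recipe/"],
--     "CLI/Workspace": ["src/autoskillit/cli/", "src/autoskillit/workspace/"],
--     "Skills": ["src/autoskillit/skills/", "src/autoskillit/skills_extended/"],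
--     "Tests": ["tests/"],
--     "Core/Config/Infra": [
--         "src/autoskillit/core/",
--         "src/autoskillit/config/",
--         "src/autoskillit/migration/",
--         "src/autoskillit/hooks/",
--         "src/autoskillit/recipes/",
--     ],
-- }
--
--
-- def partition_files_by_domain(
--     file_paths: list[str],
--     domain_paths: dict[str, list[str]] | None = None,
-- ) -> dict[str, list[str]]:
--     """Bucket each file path into the first matching domain prefix (map/dedup/group)."""
--     mapping = domain_paths if domain_paths is not None else DOMAIN_PATHS
--
--     def classify(path: str) -> str:
--         return next(
--             (
--                 domain
--                 for domain, prefixes in mapping.items()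
--                 if any(path.startswith(prefix) for prefix in prefixes)
--             ),
--             "Other",
--         )
--
--     labels = [classify(path) for path in file_paths]
--     keys = list(dict.fromkeys(labels))
--     return {k: [p for p, l in zip(file_paths, labels) if l == k] for k in keys}
-- ===== Notes on version B (the rewrite author's own statement) =====
-- stated objective: alternative
-- what changed: A buckets with a per-path loop mutating a dict via setdefault/append; B classifies every path once into a label list, dedups the labels for the key order, and builds each bucket by filtering zip(paths, labels) per key.
import Mathlib
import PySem

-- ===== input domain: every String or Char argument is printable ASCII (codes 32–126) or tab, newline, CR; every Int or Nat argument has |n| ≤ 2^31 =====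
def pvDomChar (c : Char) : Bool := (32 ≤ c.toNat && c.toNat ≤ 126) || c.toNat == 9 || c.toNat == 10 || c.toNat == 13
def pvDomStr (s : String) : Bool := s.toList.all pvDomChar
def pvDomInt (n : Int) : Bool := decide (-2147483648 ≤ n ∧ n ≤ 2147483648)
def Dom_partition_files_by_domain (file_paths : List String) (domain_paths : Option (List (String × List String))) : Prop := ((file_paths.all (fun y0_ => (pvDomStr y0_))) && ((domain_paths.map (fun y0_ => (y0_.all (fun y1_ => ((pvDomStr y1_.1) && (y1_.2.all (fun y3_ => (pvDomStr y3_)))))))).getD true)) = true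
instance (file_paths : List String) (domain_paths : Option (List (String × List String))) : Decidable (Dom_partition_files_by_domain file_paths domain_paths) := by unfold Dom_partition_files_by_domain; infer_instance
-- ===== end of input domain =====

-- B replaces A's per-path dict-mutation loop by classify-all / dedup-labels / group-by-filter; same exact dict (alternative decomposition, no speed claim).

-- ===== PORT A =====
def DOMAIN_PATHS : List (String × List String) := [
  ("Server/MCP Tools", ["src/autoskillit/server/"]),
  ("Pipeline/Execution", ["src/autoskillit/execution/", "src/autoskillit/pipeline/"]),
  ("Recipe/Validation", ["src/autoskillit/recipe/"]),
  ("CLI/Workspace", ["src/autoskillit/cli/", "src/autoskillit/workspace/"]),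
  ("Skills", ["src/autoskillit/skills/", "src/autoskillit/skills_extended/"]),
  ("Tests", ["tests/"]),
  ("Core/Config/Infra", ["src/autoskillit/core/", "src/autoskillit/config/",
    "src/autoskillit/migration/", "src/autoskillit/hooks/", "src/autoskillit/recipes/"])]

-- A's inner 'for domain, prefixes in mapping.items(): … break' loop: first matching domain
def pvLoopA (path : String) : List (String × List String) → Option String
  | [] => none
  | (domain, prefixes) :: rest =>
    if prefixes.any (fun pre => PySem.Str.startswith path pre) then some domain
    else pvLoopA path rest

def partition_files_by_domain (file_paths : List String) (domain_paths : Option (List (String × List String))) : List (String × List String) :=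
  let mapping := match domain_paths with | some m => m | none => DOMAIN_PATHS
  (file_paths.foldl (fun (buckets : PySem.Dict String (List String)) path =>
      match pvLoopA path mapping with
      | some domain => buckets.modify domain [] (fun l => l ++ [path])   -- buckets.setdefault(domain, []).append(path)
      | none => buckets.modify "Other" [] (fun l => l ++ [path])) PySem.Dict.empty).items

-- ===== PORT B =====
-- next((dom for dom, prefixes in mapping.items() if any(path.startswith(p) …)), "Other")
def pvClassify (mapping : List (String × List String)) (path : String) : String :=
  (mapping.findSome? (fun dp =>
    if dp.2.any (fun pre => PySem.Str.startswith path pre) then some dp.1 else none)).getD "Other"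

def partition_files_by_domain_alt (file_paths : List String) (domain_paths : Option (List (String × List String))) : List (String × List String) :=
  let mapping := match domain_paths with | some m => m | none => DOMAIN_PATHS
  let labels := file_paths.map (pvClassify mapping)
  let keys := PySem.List.dedup labels
  keys.map (fun k => (k, ((file_paths.zip labels).filter (fun pl => pl.2 == k)).map (fun pl => pl.1)))

-- ===== PRECONDITION & SPEC =====
def Spec_partition_files_by_domain (file_paths : List String) (domain_paths : Option (List (String × List String))) (out : List (String × List String)) : Prop := out = partition_files_by_domain_alt file_paths domain_paths
instance (file_paths : List String) (domain_paths : Option (List (String × List String))) (out : List (String × List String)) : Decidable (Spec_partition_files_by_domain file_paths domain_paths out) := by unfold Spec_partition_files_by_domain; infer_instance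

-- ===== CLAIM (what is proved, stated in full; the proofs are below) =====
def Claim_equal_partition_files_by_domain : Prop := ∀ (file_paths : List String) (domain_paths : Option (List (String × List String))), Dom_partition_files_by_domain file_paths domain_paths → Spec_partition_files_by_domain file_paths domain_paths (partition_files_by_domain file_paths domain_paths)

-- ===== LEMMAS AND PROOFS =====

-- A's inner loop computes B's classifier (minus the "Other" default)
theorem pvLoopA_eq_findSome? (path : String) (m : List (String × List String)) :
    pvLoopA path m = m.findSome? (fun dp =>
      if dp.2.any (fun pre => PySem.Str.startswith path pre) then some dp.1 else none) := by
  induction m with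
  | nil => rfl
  | cons hd tl ih =>
    obtain ⟨d, ps⟩ := hd
    simp only [pvLoopA, List.findSome?_cons]
    split_ifs with h <;> simp [ih]

-- the map-pair-filter form of a bucket equals B's zip-filter form
theorem pvFilterZip (c : String → String) (k : String) (fps : List String) :
    ((fps.map (fun p => (c p, p))).filter (fun q => q.1 == k)).map (fun q => q.2)
      = ((fps.zip (fps.map c)).filter (fun pl => pl.2 == k)).map (fun pl => pl.1) := by
  induction fps with
  | nil => rfl
  | cons p t ih =>
    simp only [List.map_cons, List.zip_cons_cons, List.filter_cons]
    by_cases h : c p = k <;> simp [h, ih]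

-- A's whole fold, with the classifier factored out, equals B's group-by
theorem pvFoldEqGroup (c : String → String) (fps : List String) :
    (fps.foldl (fun (d : PySem.Dict String (List String)) p => d.modify (c p) [] (fun l => l ++ [p]))
        PySem.Dict.empty).items
      = (PySem.List.dedup (fps.map c)).map
          (fun k => (k, ((fps.zip (fps.map c)).filter (fun pl => pl.2 == k)).map (fun pl => pl.1))) := by
  set D := fps.foldl (fun (d : PySem.Dict String (List String)) p => d.modify (c p) [] (fun l => l ++ [p]))
      PySem.Dict.empty with hD
  have hnd : D.keys.Nodup := by
    rw [hD]
    exact PySem.Dict.nodup_keys_foldl_modify_key fps c []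
      (fun d p => fun l => l ++ [p]) PySem.Dict.empty (by simp)
  have hkeys : D.keys = PySem.List.dedup (fps.map c) := by
    rw [hD, PySem.Dict.keys_foldl_modify_key]
    simp [PySem.List.dedup_eq_ofList, PySem.Set.update_nil_left]
  have hfold : D = (fps.map (fun p => (c p, p))).foldl
      (fun (d : PySem.Dict String (List String)) q => d.modify q.1 [] (fun l => l ++ [q.2]))
      PySem.Dict.empty := by
    rw [hD, List.foldl_map]
  have hget : ∀ k, D.getD k [] =
      ((fps.zip (fps.map c)).filter (fun pl => pl.2 == k)).map (fun pl => pl.1) := by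
    intro k
    rw [hfold, PySem.Dict.getD_foldl_modify_append]
    simp [pvFilterZip c k fps]
  rw [PySem.Dict.items_eq_map_keys D hnd [], hkeys]
  exact List.map_congr_left (fun k _ => by rw [hget k])

-- key step: A's match-on-loop step IS a modify keyed by B's classifier
theorem pvStep (mapping : List (String × List String)) (b : PySem.Dict String (List String)) (p : String) :
    (match pvLoopA p mapping with
     | some domain => b.modify domain [] (fun l => l ++ [p])
     | none => b.modify "Other" [] (fun l => l ++ [p]))
      = b.modify (pvClassify mapping p) [] (fun l => l ++ [p]) := by
  unfold pvClassify
  rw [← pvLoopA_eq_findSome?]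
  cases pvLoopA p mapping <;> rfl

-- the equivalence for an arbitrary mapping
theorem pvMainEq (mapping : List (String × List String)) (fps : List String) :
    (fps.foldl (fun (buckets : PySem.Dict String (List String)) path =>
        match pvLoopA path mapping with
        | some domain => buckets.modify domain [] (fun l => l ++ [path])
        | none => buckets.modify "Other" [] (fun l => l ++ [path])) PySem.Dict.empty).items
      = (PySem.List.dedup (fps.map (pvClassify mapping))).map
          (fun k => (k, ((fps.zip (fps.map (pvClassify mapping))).filter
              (fun pl => pl.2 == k)).map (fun pl => pl.1))) := by
  have hf : (fun (buckets : PySem.Dict String (List String)) path =>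
      match pvLoopA path mapping with
      | some domain => buckets.modify domain [] (fun l => l ++ [path])
      | none => buckets.modify "Other" [] (fun l => l ++ [path]))
      = fun (b : PySem.Dict String (List String)) p =>
          b.modify (pvClassify mapping p) [] (fun l => l ++ [p]) :=
    funext fun b => funext fun p => pvStep mapping b p
  rw [hf]
  exact pvFoldEqGroup (pvClassify mapping) fps

-- ===== VERDICT (by name: the statement is the Claim_ definition above) =====
theorem partition_files_by_domain_spec : Claim_equal_partition_files_by_domain := by
  intro file_paths domain_paths _
  show partition_files_by_domain file_paths domain_paths
      = partition_files_by_domain_alt file_paths domain_paths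
  cases domain_paths with
  | none => exact pvMainEq DOMAIN_PATHS file_paths
  | some m => exact pvMainEq m file_paths
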